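-- pv_equiv track=rewrite | github.com/boriskashentsev/everybody.codes | 2024/04.py | leveling
-- ===== SOURCE A (Python) =====
-- def leveling(nails):
--   minLength = nails[0]
--
--   result = 0
--   for i in range(1,len(nails)):
--     if minLength <= nails[i]:
--       result += nails[i] - minLength
--     else:
--       result += (minLength-nails[i])*i
--       minLength = nails[i]
--   return result
-- ===== SOURCE B (Python) =====
-- def leveling(nails):
--   m = nails[0]
--   for n in nails:
--     if n < m:
--       m = n
--   return sum(nails) - len(nails) * m
-- ===== Notes on version B (the rewrite author's own statement) =====
-- stated objective: faster
-- what changed: Replaces A's incremental reweighting loop (adding (minLength-nails[i])*i whenever a new minimum appears) with the closed form sum(nails) - len(nails)*min, computed by one simple min pass plus built-in sum/len (less per-element arithmetic).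
import Mathlib
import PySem

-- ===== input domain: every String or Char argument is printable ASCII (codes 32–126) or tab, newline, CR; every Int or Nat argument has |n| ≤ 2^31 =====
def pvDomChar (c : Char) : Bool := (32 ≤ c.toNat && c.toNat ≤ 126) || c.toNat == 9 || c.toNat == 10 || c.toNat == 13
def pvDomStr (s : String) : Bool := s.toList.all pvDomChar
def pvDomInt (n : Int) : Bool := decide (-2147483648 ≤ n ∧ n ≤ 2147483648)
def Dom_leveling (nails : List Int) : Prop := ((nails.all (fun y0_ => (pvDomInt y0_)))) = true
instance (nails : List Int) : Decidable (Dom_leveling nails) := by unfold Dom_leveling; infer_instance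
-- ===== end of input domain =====

-- B replaces A's incremental reweighting loop by the closed form sum(nails) - len(nails)*min; same O(n) cost, simpler.

-- ===== PORT A =====
-- the loop body of A: state = (minLength, result), i the loop index
def levelStep (nails : List Int) (st : Int × Int) (i : Int) : Int × Int :=
  let n := PySem.List.pyGetD nails i 0
  if st.1 ≤ n then (st.1, st.2 + (n - st.1))
  else (n, st.2 + (st.1 - n) * i)

def leveling (nails : List Int) : Int :=
  -- nails[0]: IndexError on []; Pre_leveling excludes the empty list
  let minLength := PySem.List.pyGetD nails 0 0
  ((PySem.List.pyRange 1 (nails.length : Int)).foldl (levelStep nails) (minLength, 0)).2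

-- ===== PORT B =====
def leveling_alt (nails : List Int) : Int :=
  let m := PySem.List.pyGetD nails 0 0          -- nails[0]; Pre_leveling excludes []
  let m := nails.foldl (fun m n => if n < m then n else m) m
  nails.sum - (nails.length : Int) * m

-- ===== PRECONDITION & SPEC =====
def Pre_leveling (nails : List Int) : Prop := nails ≠ []   -- A raises IndexError on [] (nails[0])
instance (nails : List Int) : Decidable (Pre_leveling nails) := by unfold Pre_leveling; infer_instance
def pvWitness_leveling : List Int := [3, 1, 2]

def Spec_leveling (nails : List Int) (out : Int) : Prop := out = leveling_alt nails
instance (nails : List Int) (out : Int) : Decidable (Spec_leveling nails out) := by unfold Spec_leveling; infer_instance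

-- ===== CLAIM (what is proved, stated in full; the proofs are below) =====
def Claim_equal_leveling : Prop := ∀ (nails : List Int), Dom_leveling nails → Pre_leveling nails → Spec_leveling nails (leveling nails)

-- ===== LEMMAS AND PROOFS =====

-- B's running minimum
def bmin (x : Int) (xs : List Int) : Int := xs.foldl (fun m n => if n < m then n else m) x

lemma bmin_append (x : Int) (xs : List Int) (y : Int) :
    bmin x (xs ++ [y]) = if y < bmin x xs then y else bmin x xs := by
  simp [bmin, List.foldl_append]

lemma bmin_cons_self (x : Int) (xs : List Int) : bmin x (x :: xs) = bmin x xs := by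
  simp [bmin]

-- the invariant of A's loop over indices 1 .. len(x::xs)-1
lemma loop_inv (x : Int) (xs : List Int) :
    (PySem.List.pyRange 1 ((x :: xs).length : Int)).foldl (levelStep (x :: xs)) (x, 0)
      = (bmin x xs, (x :: xs).sum - ((x :: xs).length : Int) * bmin x xs) := by
  induction xs using List.reverseRecOn with
  | nil =>
    simp [PySem.List.pyRange, bmin]
  | append_singleton ys y ih =>
    have hlen : ((x :: (ys ++ [y])).length : Int) = ((x :: ys).length : Int) + 1 := by
      push_cast [List.length_append, List.length_cons, List.length_nil]; ring
    rw [hlen, PySem.List.pyRange_one_succ_right (by simp), List.foldl_append]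
    have hcong : (PySem.List.pyRange 1 ((x :: ys).length : Int)).foldl
        (levelStep (x :: (ys ++ [y]))) (x, 0)
        = (PySem.List.pyRange 1 ((x :: ys).length : Int)).foldl (levelStep (x :: ys)) (x, 0) := by
      apply PySem.List.foldl_congr_mem
      intro acc i hi
      have hib := PySem.List.mem_pyRange_one.mp hi
      have hget : PySem.List.pyGetD (x :: (ys ++ [y])) i 0 = PySem.List.pyGetD (x :: ys) i 0 := by
        have h0 : (0:Int) ≤ i := by omega
        rw [PySem.List.pyGetD_of_nonneg _ _ h0, PySem.List.pyGetD_of_nonneg _ _ h0]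
        have hlt : i.toNat < (x :: ys).length := by
          have : (i.toNat : Int) < ((x :: ys).length : Int) := by
            rw [Int.toNat_of_nonneg h0]; exact hib.2
          exact_mod_cast this
        show (x :: (ys ++ [y])).getD i.toNat 0 = (x :: ys).getD i.toNat 0
        rw [List.getD_eq_getElem?_getD, List.getD_eq_getElem?_getD]
        rw [show x :: (ys ++ [y]) = (x :: ys) ++ [y] by simp,
            List.getElem?_append_left hlt]
      simp [levelStep, hget]
    rw [hcong, ih]
    -- one more iteration, at index len(x::ys), reading y
    have hgety : PySem.List.pyGetD (x :: (ys ++ [y])) ((x :: ys).length : Int) 0 = y := by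
      rw [PySem.List.pyGetD_of_nonneg _ _ (Int.natCast_nonneg _)]
      simp
    rw [bmin_append]
    simp only [List.foldl_cons, List.foldl_nil, levelStep, hgety]
    by_cases h : bmin x ys ≤ y
    · rw [if_pos h, if_neg (by omega)]
      simp; ring
    · rw [if_neg h, if_pos (by omega)]
      simp; ring

lemma leveling_eq_alt (x : Int) (xs : List Int) :
    leveling (x :: xs) = leveling_alt (x :: xs) := by
  have hb : List.foldl (fun m n => if n < m then n else m) x (x :: xs) = bmin x xs :=
    bmin_cons_self x xs
  simp only [leveling, leveling_alt, PySem.List.pyGetD_zero_cons, loop_inv, hb]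

-- ===== VERDICT (by name: the statement is the Claim_ definition above) =====
theorem leveling_spec : Claim_equal_leveling := by
  intro nails _ hpre
  match nails, hpre with
  | x :: xs, _ => exact leveling_eq_alt x xs
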